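-- pv_equiv track=rewrite | github.com/dsainvg/circuit_diagram_generator | svg_symbol_manager.py | get_ic_pin_positions
-- ===== SOURCE A (Python) =====
-- def get_ic_pin_positions(ic_type, total_pins):
--     """Get pin positions for IC8, IC14 and IC16 chips based on viewBox"""
--     pin_positions = {}
--
--     if ic_type == 'IC8' or total_pins == 8:
--         # IC8: viewBox="0 0 140 140", pins at y: 30,55,80,105 (spacing 25)
--         left_pins = [1, 2, 3, 4]
--         right_pins = [8, 7, 6, 5]
--
--         for i, pin in enumerate(left_pins):
--             pin_positions[pin] = {'x': 0, 'y': 30 + i * 25}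
--
--         for i, pin in enumerate(right_pins):
--             pin_positions[pin] = {'x': 140, 'y': 30 + i * 25}
--
--     elif ic_type == 'IC14' or total_pins == 14:
--         # IC14: viewBox="0 0 140 220", pins at y: 30,55,80,105,130,155,180 (spacing 25)
--         left_pins = [1, 2, 3, 4, 5, 6, 7]
--         right_pins = [14, 13, 12, 11, 10, 9, 8]
--
--         for i, pin in enumerate(left_pins):
--             pin_positions[pin] = {'x': 0, 'y': 30 + i * 25}
--
--         for i, pin in enumerate(right_pins):
--             pin_positions[pin] = {'x': 140, 'y': 30 + i * 25}
--
--     elif ic_type == 'IC16' or total_pins == 16: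
--         # IC16: viewBox="0 0 140 240", pins at y: 30,55,80,105,130,155,180,205 (spacing 25)
--         left_pins = [1, 2, 3, 4, 5, 6, 7, 8]
--         right_pins = [16, 15, 14, 13, 12, 11, 10, 9]
--
--         for i, pin in enumerate(left_pins):
--             pin_positions[pin] = {'x': 0, 'y': 30 + i * 25}
--
--         for i, pin in enumerate(right_pins):
--             pin_positions[pin] = {'x': 140, 'y': 30 + i * 25}
--
--     return pin_positions
-- ===== SOURCE B (Python) =====
-- def _pins(i, n):
--     """Recursively emit both sides in one pass: returns (left_items, right_items)
--     for rows i..n//2-1, each row i giving left pin i+1 and right pin n-i at the same y."""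
--     if i >= n // 2:
--         return [], []
--     left, right = _pins(i + 1, n)
--     y = 30 + 25 * i
--     return [(i + 1, {'x': 0, 'y': y})] + left, [(n - i, {'x': 140, 'y': y})] + right
--
--
-- def get_ic_pin_positions(ic_type, total_pins):
--     """Get pin positions for IC8, IC14 and IC16 chips based on viewBox"""
--     for name, n in (('IC8', 8), ('IC14', 14), ('IC16', 16)):
--         if ic_type == name or total_pins == n:
--             left, right = _pins(0, n)
--             return dict(left + right)
--     return {}
-- ===== Notes on version B (the rewrite author's own statement) =====
-- stated objective: alternative
-- what changed: B replaces A's three duplicated dict-insertion branch/loop blocks by a table lookup over (name, pin-count) pairs (preserving A's or-precedence) followed by ONE recursion that emits the left and right pin lists simultaneously, row by row, and concatenates them into the result dict; no enumerate loops or incremental dict inserts.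
import Mathlib
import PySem

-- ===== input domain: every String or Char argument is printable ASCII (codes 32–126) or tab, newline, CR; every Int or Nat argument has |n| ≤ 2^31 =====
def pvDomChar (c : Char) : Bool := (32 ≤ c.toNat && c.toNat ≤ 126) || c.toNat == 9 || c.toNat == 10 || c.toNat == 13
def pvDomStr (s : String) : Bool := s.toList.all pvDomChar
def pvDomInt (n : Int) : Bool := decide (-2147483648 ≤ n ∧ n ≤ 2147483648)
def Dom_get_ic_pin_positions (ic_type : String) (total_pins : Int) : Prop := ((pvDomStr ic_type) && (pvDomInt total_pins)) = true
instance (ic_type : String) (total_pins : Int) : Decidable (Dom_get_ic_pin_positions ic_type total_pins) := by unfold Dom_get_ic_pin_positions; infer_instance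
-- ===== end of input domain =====

-- B replaces A's three duplicated branch/loop dict-insert blocks by a table lookup plus one
-- recursion emitting both pin columns at once (objective: alternative decomposition, not faster).


-- ===== PORT A =====
-- {'x': x, 'y': y} literal dict
def pvMkXY (x y : Int) : PySem.Dict String Int :=
  (PySem.Dict.empty.insert "x" x).insert "y" y

def get_ic_pin_positions (ic_type : String) (total_pins : Int) : List (Int × List (String × Int)) :=
  let pin_positions : PySem.Dict Int (PySem.Dict String Int) := PySem.Dict.empty
  let pin_positions :=
    if ic_type == "IC8" || total_pins == 8 then
      let left_pins : List Int := [1, 2, 3, 4]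
      let right_pins : List Int := [8, 7, 6, 5]
      let pin_positions := (PySem.List.enumerate left_pins).foldl
        (fun d p => d.insert p.2 (pvMkXY 0 (30 + p.1 * 25))) pin_positions
      (PySem.List.enumerate right_pins).foldl
        (fun d p => d.insert p.2 (pvMkXY 140 (30 + p.1 * 25))) pin_positions
    else if ic_type == "IC14" || total_pins == 14 then
      let left_pins : List Int := [1, 2, 3, 4, 5, 6, 7]
      let right_pins : List Int := [14, 13, 12, 11, 10, 9, 8]
      let pin_positions := (PySem.List.enumerate left_pins).foldl
        (fun d p => d.insert p.2 (pvMkXY 0 (30 + p.1 * 25))) pin_positions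
      (PySem.List.enumerate right_pins).foldl
        (fun d p => d.insert p.2 (pvMkXY 140 (30 + p.1 * 25))) pin_positions
    else if ic_type == "IC16" || total_pins == 16 then
      let left_pins : List Int := [1, 2, 3, 4, 5, 6, 7, 8]
      let right_pins : List Int := [16, 15, 14, 13, 12, 11, 10, 9]
      let pin_positions := (PySem.List.enumerate left_pins).foldl
        (fun d p => d.insert p.2 (pvMkXY 0 (30 + p.1 * 25))) pin_positions
      (PySem.List.enumerate right_pins).foldl
        (fun d p => d.insert p.2 (pvMkXY 140 (30 + p.1 * 25))) pin_positions
    else pin_positions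
  pin_positions.items.map (fun p => (p.1, p.2.items))

-- ===== PORT B =====
-- _pins(i, n): one recursion over the rows i..n//2-1, emitting both columns at once.
-- The Python recursion decreases n//2 - i; here the fuel argument IS that quantity (Nat),
-- with i carried alongside — a step-for-step transcription of Source B's _pins.
def pvPins (n : Int) : Nat → Int → (List (Int × PySem.Dict String Int) × List (Int × PySem.Dict String Int))
  | 0, _ => ([], [])
  | fuel + 1, i =>
    let lr := pvPins n fuel (i + 1)
    let y := 30 + 25 * i
    ((i + 1, pvMkXY 0 y) :: lr.1, (n - i, pvMkXY 140 y) :: lr.2)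

def get_ic_pin_positions_alt (ic_type : String) (total_pins : Int) : List (Int × List (String × Int)) :=
  match [("IC8", (8 : Int)), ("IC14", 14), ("IC16", 16)].find?
      (fun p => ic_type == p.1 || total_pins == p.2) with
  | some (_, n) =>
    let lr := pvPins n (PySem.Int.floordiv n 2).toNat 0
    (PySem.Dict.ofList (lr.1 ++ lr.2)).items.map (fun p => (p.1, p.2.items))
  | none => []

-- ===== PRECONDITION & SPEC =====
def Spec_get_ic_pin_positions (ic_type : String) (total_pins : Int) (out : List (Int × List (String × Int))) : Prop := out = get_ic_pin_positions_alt ic_type total_pins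
instance (ic_type : String) (total_pins : Int) (out : List (Int × List (String × Int))) : Decidable (Spec_get_ic_pin_positions ic_type total_pins out) := by unfold Spec_get_ic_pin_positions; infer_instance

-- ===== CLAIM (what is proved, stated in full; the proofs are below) =====
def Claim_equal_get_ic_pin_positions : Prop := ∀ (ic_type : String) (total_pins : Int), Dom_get_ic_pin_positions ic_type total_pins → Spec_get_ic_pin_positions ic_type total_pins (get_ic_pin_positions ic_type total_pins)

-- ===== LEMMAS AND PROOFS =====

-- ===== VERDICT (by name: the statement is the Claim_ definition above) =====
theorem get_ic_pin_positions_spec : Claim_equal_get_ic_pin_positions := by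
  intro ic tp _
  unfold Spec_get_ic_pin_positions get_ic_pin_positions get_ic_pin_positions_alt
  cases hc1 : (ic == "IC8" || tp == 8) with
  | true => simp only [List.find?, hc1, if_true]; rfl
  | false =>
    cases hc2 : (ic == "IC14" || tp == 14) with
    | true => simp only [List.find?, hc1, hc2, if_true, if_false, Bool.false_eq_true]; rfl
    | false =>
      cases hc3 : (ic == "IC16" || tp == 16) with
      | true => simp only [List.find?, hc1, hc2, hc3, if_true, if_false, Bool.false_eq_true]; rfl
      | false => simp only [List.find?, hc1, hc2, hc3, if_false, Bool.false_eq_true]; rfl
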